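-- pv_equiv track=rewrite | github.com/ilyassari/project_euler | 018_maximum_path_sum_i.py | create_routes
-- ===== SOURCE A (Python) =====
-- def route_list_extender(routes):
--     """ take route list and give double """
--     temp = routes.copy()
--     for route in temp:
--         routes.append(list())
--         for number in route:
--             routes[-1].append(number)
--     return routes
--
-- def create_routes(step):
--     """ take step count and give route list """
--     routes = [[0]]
--     for i in range(1, step):
--         routes = route_list_extender(routes)
--         for j in range(int(len(routes) / 2)):
--             routes[j].append(routes[j][-1])
--         for j in range(int(len(routes) / 2), len(routes)):
--             routes[j].append(routes[j][-1] + 1)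
--     return routes
-- ===== SOURCE B (Python) =====
-- def create_routes(step):
--     """ take step count and give route list """
--     n = 2 ** max(step - 1, 0)
--     result = []
--     for j in range(n):
--         val = 0
--         path = [0]
--         for t in range(step - 1):
--             val += (j >> t) & 1
--             path.append(val)
--         result.append(path)
--     return result
-- ===== Notes on version B (the rewrite author's own statement) =====
-- stated objective: alternative
-- what changed: Replaces the iterative list-doubling (copy the whole route list, then extend each half) by a direct closed-form construction: route j is the prefix-sum of the bits of j, built independently for each index j in range(2**(step-1)).
import Mathlib
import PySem

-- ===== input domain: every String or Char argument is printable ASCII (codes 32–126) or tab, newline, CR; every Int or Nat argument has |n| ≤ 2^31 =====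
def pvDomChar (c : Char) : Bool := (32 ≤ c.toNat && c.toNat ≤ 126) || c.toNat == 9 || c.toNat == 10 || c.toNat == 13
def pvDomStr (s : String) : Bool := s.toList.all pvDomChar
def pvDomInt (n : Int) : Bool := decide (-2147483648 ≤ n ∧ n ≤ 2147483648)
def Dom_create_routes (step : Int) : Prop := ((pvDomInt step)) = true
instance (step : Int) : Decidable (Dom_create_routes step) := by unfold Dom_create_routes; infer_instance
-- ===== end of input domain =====

-- B builds each route directly from the bits of its index instead of A's repeated list doubling; alternative decomposition, same asymptotic cost.

-- ===== PORT A =====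
-- routes[j][-1] is ported via pyGet? (-1); the lists are always nonempty, so the
-- .getD 0 default is never used (it only makes the expression total).
def pvLastD (r : List Int) : Int := (PySem.List.pyGet? r (-1)).getD 0

-- temp = routes.copy(); for route in temp: append []; append each number to routes[-1]
def route_list_extender (routes : List (List Int)) : List (List Int) :=
  let temp := routes
  temp.foldl (fun rs route => rs ++ [route.foldl (fun acc number => acc ++ [number]) []]) routes

-- int(len(routes)/2) is ported as Nat division; the length is always a power of two,
-- where Python's float division is exact.
def create_routes (step : Int) : List (List Int) :=
  (PySem.List.pyRange 1 step 1).foldl (fun routes _i =>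
    let routes := route_list_extender routes
    let h := routes.length / 2
    (routes.take h).map (fun r => r ++ [pvLastD r]) ++
    (routes.drop h).map (fun r => r ++ [pvLastD r + 1])) [[0]]

-- ===== PORT B =====
def create_routes_alt (step : Int) : List (List Int) :=
  let n := 2 ^ (max (step - 1) 0).toNat
  (List.range n).foldl (fun result j =>
    let st := (PySem.List.pyRange 0 (step - 1) 1).foldl
      (fun (st : Int × List Int) t =>
        let val := st.1 + (((j >>> t.toNat) &&& 1 : Nat) : Int)
        (val, st.2 ++ [val])) (0, [0])
    result ++ [st.2]) []

-- ===== PRECONDITION & SPEC =====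
def Spec_create_routes (step : Int) (out : List (List Int)) : Prop := out = create_routes_alt step
instance (step : Int) (out : List (List Int)) : Decidable (Spec_create_routes step out) := by unfold Spec_create_routes; infer_instance

-- ===== CLAIM (what is proved, stated in full; the proofs are below) =====
def Claim_equal_create_routes : Prop := ∀ (step : Int), Dom_create_routes step → Spec_create_routes step (create_routes step)

-- ===== LEMMAS AND PROOFS =====

-- the t-th bit of j, as an Int
def bitI (j t : Nat) : Int := (((j >>> t) &&& 1 : Nat) : Int)

-- route of index j at depth k, together with its last value
def pathAux : Nat → Nat → List Int × Int
  | 0, _ => ([0], 0)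
  | k+1, j =>
      let p := pathAux k j
      let v := p.2 + bitI j k
      (p.1 ++ [v], v)

-- the mathematical route list at depth k
def F (k : Nat) : List (List Int) :=
  (List.range (2 ^ k)).map (fun j => (pathAux k j).1)

theorem foldl_app {α : Type} (l acc : List α) :
    l.foldl (fun a x => a ++ [x]) acc = acc ++ l := by
  induction l generalizing acc with
  | nil => simp
  | cons x xs ih => simp [List.foldl_cons, ih]

theorem foldl_app_map {α β : Type} (l : List α) (f : α → β) (acc : List β) :
    l.foldl (fun a x => a ++ [f x]) acc = acc ++ l.map f := by
  induction l generalizing acc with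
  | nil => simp
  | cons x xs ih => simp [List.foldl_cons, ih]

theorem extender_eq (routes : List (List Int)) :
    route_list_extender routes = routes ++ routes := by
  unfold route_list_extender
  simp only [foldl_app]
  exact (foldl_app_map routes id routes).trans (by simp)

theorem pvLastD_snoc (l : List Int) (x : Int) : pvLastD (l ++ [x]) = x := by
  simp [pvLastD, PySem.List.pyGet?, PySem.List.pyIdx?]

theorem pvLastD_pathAux (k j : Nat) : pvLastD (pathAux k j).1 = (pathAux k j).2 := by
  cases k with
  | zero => simp [pathAux, pvLastD, PySem.List.pyGet?, PySem.List.pyIdx?]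
  | succ k => simp [pathAux, pvLastD_snoc]

theorem bit_div (j t : Nat) : bitI j t = ((j / 2 ^ t) % 2 : Nat) := by
  simp [bitI, Nat.shiftRight_eq_div_pow, Nat.and_one_is_mod]

theorem bit_high_zero (k j : Nat) (h : j < 2 ^ k) : bitI j k = 0 := by
  rw [bit_div, Nat.div_eq_of_lt h]; simp

theorem bit_high_one (k j : Nat) (h : j < 2 ^ k) : bitI (2 ^ k + j) k = 1 := by
  rw [bit_div]
  have h2 : (2 ^ k + j) / 2 ^ k = 1 := by
    rw [Nat.add_div_left _ (Nat.pow_pos (n := k) (by norm_num)), Nat.div_eq_of_lt h]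
  rw [h2]; norm_num

theorem bit_low (k t j : Nat) (ht : t < k) (h : j < 2 ^ k) :
    bitI (2 ^ k + j) t = bitI j t := by
  rw [bit_div, bit_div]
  have hk : 2 ^ k = 2 ^ (k - t) * 2 ^ t := by
    rw [← pow_add]; congr 1; omega
  have h1 : (2 ^ k + j) / 2 ^ t = j / 2 ^ t + 2 ^ (k - t) := by
    rw [Nat.add_comm, hk, Nat.add_mul_div_right _ _ (Nat.pow_pos (n := t) (by norm_num))]
  rw [h1]
  have h2 : 2 ^ (k - t) = 2 ^ (k - t - 1) * 2 := by
    rw [← pow_succ]; congr 1; omega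
  rw [h2, Nat.add_mul_mod_self_right]

theorem pathAux_add_pow (m : Nat) (j : Nat) (hj : j < 2 ^ m) :
    ∀ k, k ≤ m → pathAux k (2 ^ m + j) = pathAux k j := by
  intro k
  induction k with
  | zero => intro _; rfl
  | succ k ih =>
      intro hk
      simp only [pathAux, ih (by omega), bit_low m k j (by omega) hj]

theorem F_step (k : Nat) :
    (let routes := route_list_extender (F k)
     let h := routes.length / 2
     (routes.take h).map (fun r => r ++ [pvLastD r]) ++
     (routes.drop h).map (fun r => r ++ [pvLastD r + 1])) = F (k + 1) := by
  have hlen : (F k).length = 2 ^ k := by simp [F]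
  have hdiv : (F k ++ F k).length / 2 = (F k).length := by
    simp only [List.length_append]; omega
  simp only [extender_eq, hdiv, List.take_left, List.drop_left]
  have h1 : (F k).map (fun r => r ++ [pvLastD r]) =
      (List.range (2 ^ k)).map (fun j => (pathAux (k + 1) j).1) := by
    simp only [F, List.map_map]
    refine List.map_congr_left (fun j hj => ?_)
    rw [List.mem_range] at hj
    simp only [Function.comp, pvLastD_pathAux, pathAux, bit_high_zero k j hj, add_zero]
  have h2 : (F k).map (fun r => r ++ [pvLastD r + 1]) =
      (List.range (2 ^ k)).map (fun j => (pathAux (k + 1) (2 ^ k + j)).1) := by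
    simp only [F, List.map_map]
    refine List.map_congr_left (fun j hj => ?_)
    rw [List.mem_range] at hj
    simp only [Function.comp, pvLastD_pathAux, pathAux,
      pathAux_add_pow k j hj k (le_refl k), bit_high_one k j hj]
  rw [h1, h2, F]
  have : 2 ^ (k + 1) = 2 ^ k + 2 ^ k := by ring
  rw [this, List.range_add, List.map_append, List.map_map]
  rfl

theorem foldl_const_iterate {α β : Type} (g : α → α) (l : List β) (init : α) :
    l.foldl (fun a _ => g a) init = g^[l.length] init := by
  induction l generalizing init with
  | nil => rfl
  | cons x xs ih => simp [List.foldl_cons, ih, Function.iterate_succ_apply]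

theorem A_eq_F (step : Int) : create_routes step = F (step - 1).toNat := by
  unfold create_routes
  rw [foldl_const_iterate, PySem.List.length_pyRange_one]
  have : step - 1 = step - 1 := rfl
  generalize (step - 1).toNat = k
  induction k with
  | zero => rfl
  | succ k ih =>
      rw [Function.iterate_succ_apply', ih]
      exact F_step k

theorem inner_fold_eq (j : Nat) (k : Nat) :
    (PySem.List.pyRange 0 (k : Int) 1).foldl
      (fun (st : Int × List Int) t =>
        let val := st.1 + (((j >>> t.toNat) &&& 1 : Nat) : Int)
        (val, st.2 ++ [val])) (0, [0]) = ((pathAux k j).2, (pathAux k j).1) := by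
  induction k with
  | zero => rfl
  | succ k ih =>
      have hc : ((k + 1 : Nat) : Int) = (k : Int) + 1 := by push_cast; ring
      rw [hc, PySem.List.pyRange_one_succ_right (by positivity), List.foldl_append, ih]
      simp [pathAux, bitI]

theorem B_eq_F (step : Int) : create_routes_alt step = F (step - 1).toNat := by
  unfold create_routes_alt
  have hmax : (max (step - 1) 0).toNat = (step - 1).toNat := by omega
  have hrange : PySem.List.pyRange 0 (step - 1) 1
      = PySem.List.pyRange 0 ((step - 1).toNat : Int) 1 := by
    by_cases h : 0 ≤ step - 1
    · rw [Int.toNat_of_nonneg h]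
    · rw [PySem.List.pyRange_one_eq_nil (by omega), PySem.List.pyRange_one_eq_nil (by omega)]
  simp only [hmax, hrange]
  rw [F]
  generalize (step - 1).toNat = k
  rw [foldl_app_map]
  simp only [List.nil_append]
  refine List.map_congr_left (fun j _ => ?_)
  simp only [inner_fold_eq j k]

-- ===== VERDICT (by name: the statement is the Claim_ definition above) =====
theorem create_routes_spec : Claim_equal_create_routes := by
  intro step _
  unfold Spec_create_routes
  rw [A_eq_F, B_eq_F]
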